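-- pv_equiv track=rewrite | github.com/Munkushi/infa-ege | number_21/think_2.py | f
-- ===== SOURCE A (Python) =====
-- def f(x, y, h):
--     if (h == 3 or h == 5) and x + y <= 20: return True
--     elif h < 5 and x + y <= 20: return False
--     elif h == 5 and x + y > 20: return False
--     else:
--         if h % 2 == 0:
--             return any([f(x - 1, y, h + 1), f(x, y - 1, h + 1), f(x // 2, y, h + 1), f(x, y // 2, h + 1)])
--         return all([f(x - 1, y, h + 1), f(x, y - 1, h + 1), f(x // 2, y, h + 1), f(x, y // 2, h + 1)])
-- ===== SOURCE B (Python) =====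
-- def f(x, y, h):
--     # Top-down dynamic programming: memoise the game value of each (x, y, h)
--     # state so overlapping subproblems (commuting -1 / //2 moves) are solved once.
--     memo = {}
--
--     def go(x, y, h):
--         key = (x, y, h)
--         if key in memo:
--             return memo[key]
--         if (h == 3 or h == 5) and x + y <= 20:
--             r = True
--         elif h < 5 and x + y <= 20:
--             r = False
--         elif h == 5 and x + y > 20:
--             r = False
--         elif h % 2 == 0:
--             r = (go(x - 1, y, h + 1) or go(x, y - 1, h + 1)
--                  or go(x // 2, y, h + 1) or go(x, y // 2, h + 1))
--         else:
--             r = (go(x - 1, y, h + 1) and go(x, y - 1, h + 1)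
--                  and go(x // 2, y, h + 1) and go(x, y // 2, h + 1))
--         memo[key] = r
--         return r
--
--     return go(x, y, h)
-- ===== Notes on version B (the rewrite author's own statement) =====
-- stated objective: faster
-- what changed: B replaces A's naive exponential game-tree recursion with top-down dynamic programming: a per-call memo dict keyed by (x, y, h) caches each state's value and the short-circuiting or/and skip children already decided, so overlapping subproblems created by the commuting -1 and //2 moves are evaluated once.
-- outside the precondition, e.g. on f(1, 1, 7): A raises RecursionError, B raises RecursionError
import Mathlib
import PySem

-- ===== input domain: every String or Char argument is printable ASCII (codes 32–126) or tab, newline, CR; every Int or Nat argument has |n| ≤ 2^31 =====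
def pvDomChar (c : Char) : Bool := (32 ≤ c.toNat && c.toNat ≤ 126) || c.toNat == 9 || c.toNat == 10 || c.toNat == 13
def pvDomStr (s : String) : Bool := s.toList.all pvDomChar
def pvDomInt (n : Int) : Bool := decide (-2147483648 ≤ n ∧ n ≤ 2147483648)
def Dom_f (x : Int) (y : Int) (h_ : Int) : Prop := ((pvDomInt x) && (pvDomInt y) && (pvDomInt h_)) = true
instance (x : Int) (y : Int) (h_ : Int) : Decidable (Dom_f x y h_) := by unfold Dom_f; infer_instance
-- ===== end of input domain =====

-- B turns A's naive game-tree recursion into top-down dynamic programming: a memo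
-- dict keyed by (x, y, h) so each reachable state is evaluated once (objective: faster
-- by merging overlapping subproblems). Return-value equivalence; no argument is mutated.

-- ===== PORT A =====
-- A's recursion always increments h_, terminating only through the h_ = 5 rules;
-- it does not terminate for h_ > 5, so the port uses fuel (5 - h_).toNat + 1,
-- which is exactly the recursion depth of A's run on any input with h_ ≤ 5.
def fFuelA : Nat → Int → Int → Int → Bool
  | 0, _, _, _ => false
  | n + 1, x, y, h_ =>
    if (h_ == 3 || h_ == 5) && x + y ≤ 20 then true
    else if h_ < 5 && x + y ≤ 20 then false
    else if h_ == 5 && decide (x + y > 20) then false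
    else if PySem.Int.mod h_ 2 == 0 then
      (fFuelA n (x - 1) y (h_ + 1) || fFuelA n x (y - 1) (h_ + 1) ||
       fFuelA n (PySem.Int.floordiv x 2) y (h_ + 1) || fFuelA n x (PySem.Int.floordiv y 2) (h_ + 1))
    else
      (fFuelA n (x - 1) y (h_ + 1) && fFuelA n x (y - 1) (h_ + 1) &&
       fFuelA n (PySem.Int.floordiv x 2) y (h_ + 1) && fFuelA n x (PySem.Int.floordiv y 2) (h_ + 1))

def f (x : Int) (y : Int) (h_ : Int) : Bool := fFuelA ((5 - h_).toNat + 1) x y h_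

-- ===== PORT B =====
-- Transliteration of Source B's inner `go`: the memo dict is threaded through; the
-- short-circuiting `or` / `and` of Source B become the nested if-chains below.
def fGo : Nat → Int → Int → Int → PySem.Dict (Int × Int × Int) Bool →
    Bool × PySem.Dict (Int × Int × Int) Bool
  | 0, _, _, _, m => (false, m)
  | n + 1, x, y, h_, m =>
    match m.get? (x, y, h_) with
    | some v => (v, m)
    | none =>
      if (h_ == 3 || h_ == 5) && x + y ≤ 20 then (true, m.insert (x, y, h_) true)
      else if h_ < 5 && x + y ≤ 20 then (false, m.insert (x, y, h_) false)
      else if h_ == 5 && decide (x + y > 20) then (false, m.insert (x, y, h_) false)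
      else if PySem.Int.mod h_ 2 == 0 then
        let r1 := fGo n (x - 1) y (h_ + 1) m
        if r1.1 then (true, r1.2.insert (x, y, h_) true) else
        let r2 := fGo n x (y - 1) (h_ + 1) r1.2
        if r2.1 then (true, r2.2.insert (x, y, h_) true) else
        let r3 := fGo n (PySem.Int.floordiv x 2) y (h_ + 1) r2.2
        if r3.1 then (true, r3.2.insert (x, y, h_) true) else
        let r4 := fGo n x (PySem.Int.floordiv y 2) (h_ + 1) r3.2
        (r4.1, r4.2.insert (x, y, h_) r4.1)
      else
        let r1 := fGo n (x - 1) y (h_ + 1) m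
        if !r1.1 then (false, r1.2.insert (x, y, h_) false) else
        let r2 := fGo n x (y - 1) (h_ + 1) r1.2
        if !r2.1 then (false, r2.2.insert (x, y, h_) false) else
        let r3 := fGo n (PySem.Int.floordiv x 2) y (h_ + 1) r2.2
        if !r3.1 then (false, r3.2.insert (x, y, h_) false) else
        let r4 := fGo n x (PySem.Int.floordiv y 2) (h_ + 1) r3.2
        (r4.1, r4.2.insert (x, y, h_) r4.1)

def f_alt (x : Int) (y : Int) (h_ : Int) : Bool :=
  (fGo ((5 - h_).toNat + 1) x y h_ (PySem.Dict.empty)).1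

-- ===== PRECONDITION & SPEC =====
-- Pre_ excludes h_ > 5, where A's recursion never reaches a terminal rule and raises
-- RecursionError, and the region h_ < -800 with x + y > 800, where A's forced recursion
-- depth min(5 - h_, x + y - 20) exceeds 781 so A either overruns CPython's recursion
-- limit (RecursionError) or would need at least 2^781 calls and never returns.
def Pre_f (x : Int) (y : Int) (h_ : Int) : Prop := h_ ≤ 5 ∧ (-800 ≤ h_ ∨ x + y ≤ 800)
instance (x : Int) (y : Int) (h_ : Int) : Decidable (Pre_f x y h_) := by unfold Pre_f; infer_instance
def pvWitness_f : Int × Int × Int := (10, 10, 4)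
def Spec_f (x : Int) (y : Int) (h_ : Int) (out : Bool) : Prop := out = f_alt x y h_
instance (x : Int) (y : Int) (h_ : Int) (out : Bool) : Decidable (Spec_f x y h_ out) := by unfold Spec_f; infer_instance

-- ===== CLAIM (what is proved, stated in full; the proofs are below) =====
def Claim_equal_f : Prop := ∀ (x : Int) (y : Int) (h_ : Int), Dom_f x y h_ → Pre_f x y h_ → Spec_f x y h_ (f x y h_)

-- ===== LEMMAS AND PROOFS =====

-- With h_ ≤ 5, A's recursion depth is bounded by (5 - h_).toNat: fuel is irrelevant
-- once it exceeds that bound.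
theorem fFuelA_irrel (n : Nat) : ∀ (m : Nat) (x y h_ : Int), h_ ≤ 5 →
    (5 - h_).toNat < n → (5 - h_).toNat < m → fFuelA n x y h_ = fFuelA m x y h_ := by
  induction n with
  | zero => intro m x y h_ _ hn _; omega
  | succ n ih =>
    intro m x y h_ h5 hn hm
    obtain ⟨m, rfl⟩ : ∃ m', m = m' + 1 := ⟨m - 1, by omega⟩
    simp only [fFuelA]
    split_ifs with c1 c2 c3
    · rfl
    · rfl
    · rfl
    all_goals
      -- recursive case: the three terminal tests failed, so h_ < 5
      have hlt : h_ < 5 := by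
        rcases lt_or_eq_of_le h5 with h | h
        · exact h
        · exfalso
          simp [← h] at c1 c3
          omega
      have hb : (5 - (h_ + 1)).toNat < n := by omega
      have hb' : (5 - (h_ + 1)).toNat < m := by omega
      have h5' : h_ + 1 ≤ 5 := by omega
      rw [ih n (x-1) y (h_+1) h5' hb hb, ih n x (y-1) (h_+1) h5' hb hb,
          ih n (PySem.Int.floordiv x 2) y (h_+1) h5' hb hb,
          ih n x (PySem.Int.floordiv y 2) (h_+1) h5' hb hb,
          ih m (x-1) y (h_+1) h5' hb hb', ih m x (y-1) (h_+1) h5' hb hb',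
          ih m (PySem.Int.floordiv x 2) y (h_+1) h5' hb hb',
          ih m x (PySem.Int.floordiv y 2) (h_+1) h5' hb hb']

-- Every cached value is A's value of that state (and its h_ is ≤ 5).
def ValidMemo (m : PySem.Dict (Int × Int × Int) Bool) : Prop :=
  ∀ x y h_ b, m.get? (x, y, h_) = some b → h_ ≤ 5 ∧ b = f x y h_

-- One-step unfolding of A's port, with the recursive calls re-expressed through f itself.
theorem f_unfold (x y h_ : Int) (h5 : h_ ≤ 5) :
    f x y h_ =
      if (h_ == 3 || h_ == 5) && x + y ≤ 20 then true
      else if h_ < 5 && x + y ≤ 20 then false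
      else if h_ == 5 && decide (x + y > 20) then false
      else if PySem.Int.mod h_ 2 == 0 then
        (f (x - 1) y (h_ + 1) || f x (y - 1) (h_ + 1) ||
         f (PySem.Int.floordiv x 2) y (h_ + 1) || f x (PySem.Int.floordiv y 2) (h_ + 1))
      else
        (f (x - 1) y (h_ + 1) && f x (y - 1) (h_ + 1) &&
         f (PySem.Int.floordiv x 2) y (h_ + 1) && f x (PySem.Int.floordiv y 2) (h_ + 1)) := by
  conv_lhs => unfold f
  simp only [fFuelA]
  split_ifs with c1 c2 c3
  · rfl
  · rfl
  · rfl
  all_goals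
    have hlt : h_ < 5 := by
      rcases lt_or_eq_of_le h5 with h | h
      · exact h
      · exfalso
        simp [← h] at c1 c3
        omega
    have h5' : h_ + 1 ≤ 5 := by omega
    have hb : (5 - (h_ + 1)).toNat < (5 - h_).toNat := by omega
    have hb' : (5 - (h_ + 1)).toNat < (5 - (h_ + 1)).toNat + 1 := by omega
    rw [show f (x - 1) y (h_ + 1) = fFuelA ((5 - (h_ + 1)).toNat + 1) (x - 1) y (h_ + 1) from rfl,
        show f x (y - 1) (h_ + 1) = fFuelA ((5 - (h_ + 1)).toNat + 1) x (y - 1) (h_ + 1) from rfl,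
        show f (PySem.Int.floordiv x 2) y (h_ + 1) =
          fFuelA ((5 - (h_ + 1)).toNat + 1) (PySem.Int.floordiv x 2) y (h_ + 1) from rfl,
        show f x (PySem.Int.floordiv y 2) (h_ + 1) =
          fFuelA ((5 - (h_ + 1)).toNat + 1) x (PySem.Int.floordiv y 2) (h_ + 1) from rfl,
        fFuelA_irrel _ _ (x - 1) y (h_ + 1) h5' hb hb',
        fFuelA_irrel _ _ x (y - 1) (h_ + 1) h5' hb hb',
        fFuelA_irrel _ _ (PySem.Int.floordiv x 2) y (h_ + 1) h5' hb hb',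
        fFuelA_irrel _ _ x (PySem.Int.floordiv y 2) (h_ + 1) h5' hb hb']

theorem validMemo_insert (m : PySem.Dict (Int × Int × Int) Bool) (hm : ValidMemo m)
    (x y h_ : Int) (b : Bool) (h5 : h_ ≤ 5) (hb : b = f x y h_) :
    ValidMemo (m.insert (x, y, h_) b) := by
  intro a c d e he
  rw [PySem.Dict.get?_insert] at he
  split_ifs at he with hk
  · obtain ⟨rfl, rfl, rfl⟩ : a = x ∧ c = y ∧ d = h_ := by
      simpa [Prod.ext_iff] using hk
    cases he
    exact ⟨h5, hb⟩
  · exact hm a c d e he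

theorem fGo_correct (n : Nat) : ∀ (x y h_ : Int) (m : PySem.Dict (Int × Int × Int) Bool),
    h_ ≤ 5 → (5 - h_).toNat < n → ValidMemo m →
    (fGo n x y h_ m).1 = f x y h_ ∧ ValidMemo (fGo n x y h_ m).2 := by
  induction n with
  | zero => intro x y h_ m _ hn _; omega
  | succ n ih =>
    intro x y h_ m h5 hn hm
    simp only [fGo]
    split
    · -- cache hit: the stored value is A's value
      rename_i v hget
      exact ⟨(hm x y h_ v hget).2, hm⟩
    · -- cache miss
      rename_i hget
      split_ifs with c1 c2 c3 c4
      · have hv : f x y h_ = true := by rw [f_unfold x y h_ h5]; simp [c1]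
        exact ⟨hv.symm, validMemo_insert m hm x y h_ true h5 hv.symm⟩
      · have hv : f x y h_ = false := by rw [f_unfold x y h_ h5]; simp [c1, c2]
        exact ⟨hv.symm, validMemo_insert m hm x y h_ false h5 hv.symm⟩
      · have hv : f x y h_ = false := by rw [f_unfold x y h_ h5]; simp [c1, c2, c3]
        exact ⟨hv.symm, validMemo_insert m hm x y h_ false h5 hv.symm⟩
      all_goals
        have hlt : h_ < 5 := by
          rcases lt_or_eq_of_le h5 with h | h
          · exact h
          · exfalso
            simp [← h] at c1 c3
            omega
        have h5' : h_ + 1 ≤ 5 := by omega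
        have hb : (5 - (h_ + 1)).toNat < n := by omega
        have hfx := f_unfold x y h_ h5
      -- even case (any): the four leaves of the short-circuit `or` chain
      · rename_i b1
        have h1 := ih (x - 1) y (h_ + 1) m h5' hb hm
        have hv : f x y h_ = true := by rw [hfx, if_neg c1, if_neg c2, if_neg c3, if_pos c4]; simp [← h1.1, b1]
        exact ⟨hv.symm, validMemo_insert _ h1.2 x y h_ true h5 hv.symm⟩
      · rename_i b1 b2
        have h1 := ih (x - 1) y (h_ + 1) m h5' hb hm
        have h2 := ih x (y - 1) (h_ + 1) _ h5' hb h1.2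
        have hv : f x y h_ = true := by rw [hfx, if_neg c1, if_neg c2, if_neg c3, if_pos c4]; simp [← h2.1, b2]
        exact ⟨hv.symm, validMemo_insert _ h2.2 x y h_ true h5 hv.symm⟩
      · rename_i b1 b2 b3
        have h1 := ih (x - 1) y (h_ + 1) m h5' hb hm
        have h2 := ih x (y - 1) (h_ + 1) _ h5' hb h1.2
        have h3 := ih (PySem.Int.floordiv x 2) y (h_ + 1) _ h5' hb h2.2
        have hv : f x y h_ = true := by rw [hfx, if_neg c1, if_neg c2, if_neg c3, if_pos c4]; simp only [← h3.1, b3]; simp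
        exact ⟨hv.symm, validMemo_insert _ h3.2 x y h_ true h5 hv.symm⟩
      · rename_i b1 b2 b3
        have h1 := ih (x - 1) y (h_ + 1) m h5' hb hm
        have h2 := ih x (y - 1) (h_ + 1) _ h5' hb h1.2
        have h3 := ih (PySem.Int.floordiv x 2) y (h_ + 1) _ h5' hb h2.2
        have h4 := ih x (PySem.Int.floordiv y 2) (h_ + 1) _ h5' hb h3.2
        have hv : f x y h_ = (fGo n x (PySem.Int.floordiv y 2) (h_ + 1)
            (fGo n (PySem.Int.floordiv x 2) y (h_ + 1)
              (fGo n x (y - 1) (h_ + 1) (fGo n (x - 1) y (h_ + 1) m).2).2).2).1 := by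
          simp only [Bool.not_eq_true] at b1 b2 b3
          rw [hfx, if_neg c1, if_neg c2, if_neg c3, if_pos c4]
          simp only [← h1.1, ← h2.1, ← h3.1, ← h4.1]
          simp only [b1, b2, b3]; simp
        exact ⟨hv.symm, validMemo_insert _ h4.2 x y h_ _ h5 hv.symm⟩
      -- odd case (all): the four leaves of the short-circuit `and` chain
      · rename_i b1
        have h1 := ih (x - 1) y (h_ + 1) m h5' hb hm
        simp only [Bool.not_eq_true'] at b1
        have hv : f x y h_ = false := by rw [hfx, if_neg c1, if_neg c2, if_neg c3, if_neg c4]; simp [← h1.1, b1]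
        exact ⟨hv.symm, validMemo_insert _ h1.2 x y h_ false h5 hv.symm⟩
      · rename_i b1 b2
        have h1 := ih (x - 1) y (h_ + 1) m h5' hb hm
        have h2 := ih x (y - 1) (h_ + 1) _ h5' hb h1.2
        simp only [Bool.not_eq_true'] at b2
        have hv : f x y h_ = false := by rw [hfx, if_neg c1, if_neg c2, if_neg c3, if_neg c4]; simp [← h2.1, b2]
        exact ⟨hv.symm, validMemo_insert _ h2.2 x y h_ false h5 hv.symm⟩
      · rename_i b1 b2 b3
        have h1 := ih (x - 1) y (h_ + 1) m h5' hb hm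
        have h2 := ih x (y - 1) (h_ + 1) _ h5' hb h1.2
        have h3 := ih (PySem.Int.floordiv x 2) y (h_ + 1) _ h5' hb h2.2
        simp only [Bool.not_eq_true'] at b3
        have hv : f x y h_ = false := by rw [hfx, if_neg c1, if_neg c2, if_neg c3, if_neg c4]; simp only [← h3.1, b3]; simp
        exact ⟨hv.symm, validMemo_insert _ h3.2 x y h_ false h5 hv.symm⟩
      · rename_i b1 b2 b3
        have h1 := ih (x - 1) y (h_ + 1) m h5' hb hm
        have h2 := ih x (y - 1) (h_ + 1) _ h5' hb h1.2
        have h3 := ih (PySem.Int.floordiv x 2) y (h_ + 1) _ h5' hb h2.2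
        have h4 := ih x (PySem.Int.floordiv y 2) (h_ + 1) _ h5' hb h3.2
        have hv : f x y h_ = (fGo n x (PySem.Int.floordiv y 2) (h_ + 1)
            (fGo n (PySem.Int.floordiv x 2) y (h_ + 1)
              (fGo n x (y - 1) (h_ + 1) (fGo n (x - 1) y (h_ + 1) m).2).2).2).1 := by
          simp only [Bool.not_eq_eq_eq_not, Bool.not_true] at b1 b2 b3
          rw [hfx, if_neg c1, if_neg c2, if_neg c3, if_neg c4]
          simp only [← h1.1, ← h2.1, ← h3.1, ← h4.1]
          simp only [b1, b2, b3]; simp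
        exact ⟨hv.symm, validMemo_insert _ h4.2 x y h_ _ h5 hv.symm⟩

-- ===== VERDICT (by name: the statement is the Claim_ definition above) =====
theorem f_spec : Claim_equal_f := by
  intro x y h_ _ hpre
  unfold Spec_f f_alt
  have h5 := hpre.1
  have := fGo_correct ((5 - h_).toNat + 1) x y h_ PySem.Dict.empty h5 (by omega)
    (by intro a b c d hd; simp [PySem.Dict.get?, PySem.Dict.empty] at hd)
  exact (this.1).symm
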